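-- pv_equiv track=rewrite | github.com/mozan73-droid/Mozan1 | mssql_table_copy.py | _split_3part
-- ===== SOURCE A (Python) =====
-- from typing import Iterable, List, Optional, Sequence, Tuple
--
-- def _split_3part(name: str) -> Tuple[Optional[str], Optional[str], str]:
--     """
--     Accepts:
--       table
--       schema.table
--       db.schema.table
--     Returns: (db, schema, table)
--     """
--     parts = [p for p in name.split(".") if p]
--     if len(parts) == 1:
--         return (None, None, parts[0])
--     if len(parts) == 2:
--         return (None, parts[0], parts[1])
--     if len(parts) == 3:
--         return (parts[0], parts[1], parts[2])
--     raise ValueError(f"Invalid table name '{name}'. Use table, schema.table, or db.schema.table.")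
-- ===== SOURCE B (Python) =====
-- def _split_3part(name):
--     # Single left-to-right character scan with a rolling 3-register window:
--     # no intermediate parts list is ever built.
--     db = schema = table = None
--     count = 0
--     cur = ""
--     for ch in name + ".":
--         if ch == ".":
--             if cur:
--                 db, schema, table = schema, table, cur
--                 count += 1
--                 cur = ""
--         else:
--             cur += ch
--     if count == 0 or count > 3:
--         raise ValueError(f"Invalid table name '{name}'. Use table, schema.table, or db.schema.table.")
--     return (db, schema, table)
-- ===== Notes on version B (the rewrite author's own statement) =====
-- stated objective: alternative
-- what changed: Replaces A's split-into-a-parts-list, filter-empties and three explicit length branches by a single left-to-right character scan that never builds a parts list: it keeps a rolling 3-register window (db, schema, table) shifted at each nonempty token plus a token counter, and validates the counter once at the end.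
import Mathlib
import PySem

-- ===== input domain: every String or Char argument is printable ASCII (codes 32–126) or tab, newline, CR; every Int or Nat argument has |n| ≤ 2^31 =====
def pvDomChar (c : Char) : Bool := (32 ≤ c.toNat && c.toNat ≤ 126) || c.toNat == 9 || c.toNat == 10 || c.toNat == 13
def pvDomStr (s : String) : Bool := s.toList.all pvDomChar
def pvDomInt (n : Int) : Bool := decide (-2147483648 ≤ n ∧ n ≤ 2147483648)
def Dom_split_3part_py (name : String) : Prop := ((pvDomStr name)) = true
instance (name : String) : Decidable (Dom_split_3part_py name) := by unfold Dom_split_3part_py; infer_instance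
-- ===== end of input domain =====

-- B replaces A's split-then-branch (build a parts list, filter empties, three length cases)
-- with a single character scan keeping a rolling 3-register window (db, schema, table) and a
-- part counter, never building a list of parts (objective: alternative); equal wherever A returns.


-- ===== PORT A =====
-- parts = [p for p in name.split(".") if p]; split? is some since the separator "." ≠ ""
def split_3part_py (name : String) : Option String × Option String × String :=
  let parts := ((PySem.Str.split? name ".").getD []).filter (fun p => p ≠ "")
  if parts.length = 1 then (none, none, parts.getD 0 "")
  else if parts.length = 2 then (none, some (parts.getD 0 ""), parts.getD 1 "")
  else if parts.length = 3 then (some (parts.getD 0 ""), some (parts.getD 1 ""), parts.getD 2 "")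
  else (none, none, "")  -- Python raises ValueError here; excluded by Pre_

-- ===== PORT B =====
-- loop body of B: one step per character of name + "."
def pvStepB (st : Option String × Option String × Option String × Nat × List Char) (ch : Char) :
    Option String × Option String × Option String × Nat × List Char :=
  let (db, schema, table, count, cur) := st
  if ch = '.' then
    if cur = [] then st
    else (schema, table, some (String.ofList cur), count + 1, ([] : List Char))
  else (db, schema, table, count, cur ++ [ch])

def split_3part_py_alt (name : String) : Option String × Option String × String :=
  let (db, schema, table, count, _) :=
    (name.toList ++ ['.']).foldl pvStepB (none, none, none, 0, ([] : List Char))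
  if count = 0 ∨ 3 < count then (none, none, "")  -- Python raises ValueError here; excluded by Pre_
  else (db, schema, table.getD "")

-- ===== PRECONDITION & SPEC =====
-- A raises ValueError when the number of nonempty dot-separated parts is 0 or more than 3.
def Pre_split_3part_py (name : String) : Prop :=
  1 ≤ (((PySem.Str.split? name ".").getD []).filter (fun p => p ≠ "")).length ∧
  (((PySem.Str.split? name ".").getD []).filter (fun p => p ≠ "")).length ≤ 3
instance (name : String) : Decidable (Pre_split_3part_py name) := by unfold Pre_split_3part_py; infer_instance
def pvWitness_split_3part_py : String := "db.schema.table"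
def Spec_split_3part_py (name : String) (out : Option String × Option String × String) : Prop := out = split_3part_py_alt name
instance (name : String) (out : Option String × Option String × String) : Decidable (Spec_split_3part_py name out) := by unfold Spec_split_3part_py; infer_instance

-- ===== CLAIM (what is proved, stated in full; the proofs are below) =====
def Claim_equal_split_3part_py : Prop := ∀ (name : String), Dom_split_3part_py name → Pre_split_3part_py name → Spec_split_3part_py name (split_3part_py name)

-- ===== LEMMAS AND PROOFS =====

-- structural mirror of PySem.Chars.splitOn with separator ['.'] (accumulator reversed)
def pvSp : List Char → List Char → List (List Char)
  | [], cur => [cur.reverse]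
  | c :: rest, cur => if c = '.' then cur.reverse :: pvSp rest [] else pvSp rest (c :: cur)

-- the nonempty tokens of cur ++ cs split on '.', accumulated in order (as B's loop does)
def pvToks : List Char → List Char → List (List Char)
  | [], cur => if cur = [] then [] else [cur]
  | c :: rest, cur =>
      if c = '.' then (if cur = [] then pvToks rest [] else cur :: pvToks rest [])
      else pvToks rest (cur ++ [c])

lemma pvGo_eq (l : List Char) : ∀ (fuel : Nat) (cur : List Char) (acc : List (List Char)),
    l.length < fuel →
    PySem.Chars.splitOn.go ['.'] fuel l cur acc = acc.reverse ++ pvSp l cur := by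
  induction l with
  | nil =>
    intro fuel cur acc h
    match fuel, h with
    | fuel + 1, _ => simp [PySem.Chars.splitOn.go, pvSp]
  | cons c rest ih =>
    intro fuel cur acc h
    match fuel, h with
    | fuel + 1, h =>
      by_cases hc : c = '.'
      · subst hc
        have hp : List.isPrefixOf ['.'] ('.' :: rest) = true := by
          simp [List.isPrefixOf]
        simp only [PySem.Chars.splitOn.go, hp, if_pos]
        rw [show List.drop (['.'] : List Char).length ('.' :: rest) = rest from rfl]
        rw [ih fuel [] (cur.reverse :: acc) (by simpa using h)]
        simp [pvSp]
      · have hp : List.isPrefixOf ['.'] (c :: rest) = false := by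
          simp [List.isPrefixOf]
          exact fun h' => hc h'.symm
        simp only [PySem.Chars.splitOn.go, hp, Bool.false_eq_true, if_false]
        rw [ih fuel (c :: cur) acc (by simpa using h)]
        simp [pvSp, hc]

lemma pvSplitOn_eq (cs : List Char) : PySem.Chars.splitOn cs ['.'] = pvSp cs [] := by
  have := pvGo_eq cs (cs.length + 1) [] [] (by omega)
  simpa [PySem.Chars.splitOn] using this

lemma pvSp_filter (cs : List Char) : ∀ cur : List Char,
    (pvSp cs cur).filter (fun p => p ≠ []) = pvToks cs cur.reverse := by
  induction cs with
  | nil =>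
    intro cur
    by_cases h : cur = [] <;> simp [pvSp, pvToks, h]
  | cons c rest ih =>
    intro cur
    by_cases hc : c = '.'
    · subst hc
      by_cases h : cur = []
      · subst h; simpa [pvSp, pvToks] using ih []
      · simp [pvSp, pvToks, h]
        simpa using ih []
    · simpa [pvSp, pvToks, hc] using ih (c :: cur)

-- the register part of B's loop state, expressed over the token list
def pvShift (r : Option String × Option String × Option String × Nat) (p : List Char) :
    Option String × Option String × Option String × Nat :=
  (r.2.1, r.2.2.1, some (String.ofList p), r.2.2.2 + 1)

def pvPad (r : Option String × Option String × Option String × Nat) :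
    Option String × Option String × Option String × Nat × List Char :=
  (r.1, r.2.1, r.2.2.1, r.2.2.2, [])

lemma pvFold_eq (cs : List Char) : ∀ (cur : List Char)
    (db schema table : Option String) (count : Nat),
    (cs ++ ['.']).foldl pvStepB (db, schema, table, count, cur) =
      pvPad ((pvToks cs cur).foldl pvShift (db, schema, table, count)) := by
  induction cs with
  | nil =>
    intro cur db schema table count
    by_cases h : cur = [] <;>
      simp [pvToks, pvStepB, pvShift, pvPad, h]
  | cons c rest ih =>
    intro cur db schema table count
    by_cases hc : c = '.'
    · subst hc
      by_cases h : cur = []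
      · subst h
        simpa [pvToks, pvStepB] using ih [] db schema table count
      · simp only [List.cons_append, List.foldl_cons, pvStepB, if_neg h, pvToks]
        simpa [pvShift, h] using ih [] schema table (some (String.ofList cur)) (count + 1)
    · simp only [List.cons_append, List.foldl_cons, pvStepB, hc, if_false, pvToks]
      exact ih (cur ++ [c]) db schema table count

lemma pvOfList_ne_empty (p : List Char) (hp : p ≠ []) : String.ofList p ≠ "" := by
  intro h
  have := congrArg String.toList h
  simp at this
  exact hp this

lemma pvParts_eq (name : String) :
    ((PySem.Str.split? name ".").getD []).filter (fun p => p ≠ "") =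
      (pvToks name.toList []).map String.ofList := by
  have h1 : PySem.Str.split? name "." =
      some ((PySem.Chars.splitOn name.toList ['.']).map String.ofList) := by
    simp [PySem.Str.split?, PySem.Chars.split?]
  rw [h1, Option.getD_some, pvSplitOn_eq, List.filter_map]
  have h2 : (pvSp name.toList []).filter ((fun p => decide (p ≠ "")) ∘ String.ofList) =
      (pvSp name.toList []).filter (fun p => p ≠ []) := by
    apply List.filter_congr
    intro a _
    by_cases ha : a = []
    · subst ha; simp
    · simp [ha, pvOfList_ne_empty a ha]
  rw [h2, pvSp_filter name.toList []]
  rfl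

-- ===== VERDICT (by name: the statement is the Claim_ definition above) =====
theorem split_3part_py_spec : Claim_equal_split_3part_py := by
  intro name _ hpre
  unfold Spec_split_3part_py
  obtain ⟨h1, h3⟩ := hpre
  rw [pvParts_eq] at h1 h3
  simp only [split_3part_py, split_3part_py_alt]
  rw [pvParts_eq, pvFold_eq name.toList [] none none none 0]
  match hT : pvToks name.toList [] with
  | [a] => simp [pvShift, pvPad]
  | [a, b] => simp [pvShift, pvPad]
  | [a, b, c] => simp [pvShift, pvPad]
  | [] => rw [hT] at h1; simp at h1
  | a :: b :: c :: d :: t => rw [hT] at h3; simp at h3; omega
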